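-- pv_equiv track=rewrite | github.com/ChoiBeomJun99/FinancialDevCT | 20230816/ChoiBeomjun/Algorithm_CH.py | solution
-- ===== SOURCE A (Python) =====
-- def solution(cacheSize, cities):
--     # LRU 알고리즘 구현 문제 - 가장 오래된 페이지를 교체한다. hit +1 / miss +5
--     executionTime = 0 # 총 실행 시간 (return 값)
--
--     nowCache = [] # 현재 캐시에 들어가 있는 리스트
--     nowCacheOrder = [] # 현재 캐시에 들어가 있는 도시들의 들어간 시간
--
--     # 캐시사이즈 0인 경우 예외처리
--     if cacheSize == 0:
--         return 5 * len(cities)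
--
--     order = 0 # 자신이 캐시에 들어간게 몇번째인지
--     # 실행할 도시 이름 리스트가 빌 때까지 실행
--     while len(cities) > 0:
--         tmp = cities.pop(0)
--         tmp = tmp.upper() # 대소문자 구분 없으므로 다 대문자로 변경
--
--         if tmp in nowCache:
--             # hit (1번의 경우)
--             idx = nowCache.index(tmp)
--             nowCacheOrder[idx] = order # order 업데이트 (가장 최근 사용)
--             executionTime += 1
--         else:
--             # miss
--             executionTime += 5
--
--             if len(nowCache) < cacheSize:
--                 nowCache.append(tmp)
--                 nowCacheOrder.append(order)
--             else:
--                 # miss (LRU 알고리즘 발동해야함)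
--                 minOrder = min(nowCacheOrder) # 가장 오래된 지역 찾기
--                 idx = nowCacheOrder.index(minOrder) # 지워야할 idx 찾기
--
--                 # 지우기
--                 nowCache.pop(idx)
--                 nowCacheOrder.pop(idx)
--
--                 # 페이징 작업
--                 nowCache.append(tmp)
--                 nowCacheOrder.append(order)
--
--         # 순서 표기
--         order += 1
--
--     return executionTime
-- ===== SOURCE B (Python) =====
-- def solution(cacheSize, cities):
--     # Single LRU-ordered list (least- to most-recently-used); no timestamp
--     # counter and no min/index scan. Mutates/empties `cities` exactly like A.
--     if cacheSize == 0:
--         return 5 * len(cities)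
--     executionTime = 0
--     cache = []
--     while len(cities) > 0:
--         tmp = cities.pop(0)
--         tmp = tmp.upper()
--         if tmp in cache:
--             cache.remove(tmp)
--             cache.append(tmp)
--             executionTime += 1
--         else:
--             executionTime += 5
--             if len(cache) < cacheSize:
--                 cache.append(tmp)
--             else:
--                 cache.pop(0)
--                 cache.append(tmp)
--     return executionTime
-- ===== Notes on version B (the rewrite author's own statement) =====
-- stated objective: simpler
-- what changed: Replaces A's two parallel lists plus a timestamp counter and per-miss min/index eviction scan with a single list kept in recency order, so eviction is pop(0) and a hit is remove+append.
import Mathlib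
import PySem

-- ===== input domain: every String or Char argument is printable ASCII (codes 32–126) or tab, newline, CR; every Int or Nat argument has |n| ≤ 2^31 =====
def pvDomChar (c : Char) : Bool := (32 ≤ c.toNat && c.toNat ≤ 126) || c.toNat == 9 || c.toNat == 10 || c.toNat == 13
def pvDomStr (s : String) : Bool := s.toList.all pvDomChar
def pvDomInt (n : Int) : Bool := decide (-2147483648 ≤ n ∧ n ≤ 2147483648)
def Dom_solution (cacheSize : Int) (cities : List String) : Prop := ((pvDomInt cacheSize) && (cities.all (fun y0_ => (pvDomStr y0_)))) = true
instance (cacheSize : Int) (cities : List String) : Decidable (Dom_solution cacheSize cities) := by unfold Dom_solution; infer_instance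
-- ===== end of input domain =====

-- B replaces A's two parallel lists (cache + insertion-timestamps with a min/index eviction scan)
-- by one list kept in least-to-most-recently-used order, so eviction is pop(0) and a hit is remove+append.
-- Both A and B pop `cities` from the front in place (same mutation); the equivalence is about the return value.

-- ===== PORT A =====
-- while-loop of A: state (executionTime, nowCache, nowCacheOrder, order); cities consumed from the front.
-- nowCache.pop(idx)/nowCacheOrder.pop(idx): idx is in range (index? returned some), so the list becomes eraseIdx idx.
def solutionLoop (cacheSize : Int) (et : Int) (nc : List String) (no : List Int) (order : Int) :
    List String → Int
  | [] => et
  | c :: rest =>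
    let tmp := PySem.Str.upper c
    if tmp ∈ nc then
      match PySem.List.index? nc tmp with
      | some idx => solutionLoop cacheSize (et + 1) nc (no.set idx order) (order + 1) rest
      | none => 0
    else
      if (nc.length : Int) < cacheSize then
        solutionLoop cacheSize (et + 5) (nc ++ [tmp]) (no ++ [order]) (order + 1) rest
      else
        match PySem.List.min? no (fun y => y) with
        | none => 0
        | some m =>
          match PySem.List.index? no m with
          | some idx =>
              solutionLoop cacheSize (et + 5) (nc.eraseIdx idx ++ [tmp]) (no.eraseIdx idx ++ [order]) (order + 1) rest
          | none => 0
def solution (cacheSize : Int) (cities : List String) : Int :=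
  if cacheSize = 0 then 5 * (cities.length : Int)
  else solutionLoop cacheSize 0 [] [] 0 cities

def solutionAltLoop (cacheSize : Int) (et : Int) (cache : List String) : List String → Int
  | [] => et
  | c :: rest =>
    let tmp := PySem.Str.upper c
    if tmp ∈ cache then
      match PySem.List.remove? cache tmp with
      | some cache' => solutionAltLoop cacheSize (et + 1) (cache' ++ [tmp]) rest
      | none => 0
    else
      if (cache.length : Int) < cacheSize then
        solutionAltLoop cacheSize (et + 5) (cache ++ [tmp]) rest
      else
        solutionAltLoop cacheSize (et + 5) (cache.drop 1 ++ [tmp]) rest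
def solution_alt (cacheSize : Int) (cities : List String) : Int :=
  if cacheSize = 0 then 5 * (cities.length : Int)
  else solutionAltLoop cacheSize 0 [] cities


-- ===== PRECONDITION & SPEC =====
-- Pre_ excludes only inputs where A raises: for negative cacheSize and nonempty cities the first
-- miss makes A call min([]) (ValueError); B raises there too ([].pop(0), IndexError).
def Pre_solution (cacheSize : Int) (cities : List String) : Prop :=
  0 ≤ cacheSize ∨ cities = []
instance (cacheSize : Int) (cities : List String) : Decidable (Pre_solution cacheSize cities) := by
  unfold Pre_solution; infer_instance
def pvWitness_solution : Int × List String := (2, ["jeju", "Seoul", "JEJU", "busan", "seoul"])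
def Spec_solution (cacheSize : Int) (cities : List String) (out : Int) : Prop := out = solution_alt cacheSize cities
instance (cacheSize : Int) (cities : List String) (out : Int) : Decidable (Spec_solution cacheSize cities out) := by unfold Spec_solution; infer_instance

-- ===== CLAIM (what is proved, stated in full; the proofs are below) =====
def Claim_equal_solution : Prop := ∀ (cacheSize : Int) (cities : List String), Dom_solution cacheSize cities → Pre_solution cacheSize cities → Spec_solution cacheSize cities (solution cacheSize cities)

-- ===== LEMMAS AND PROOFS =====
-- helper lemmas (used by loop_eq below)
theorem zip_set_right {α β : Type} (v : α) :
    ∀ (a : List α) (b : List β) (i : Nat) (x : β), a[i]? = some v → a.length = b.length →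
      a.zip (b.set i x) = (a.zip b).set i (v, x)
  | [], _, _, _, hv, _ => by simp at hv
  | ha :: ta, [], _, _, _, hl => by simp at hl
  | ha :: ta, hb :: tb, 0, x, hv, hl => by
      simp at hv; simp [hv]
  | ha :: ta, hb :: tb, i + 1, x, hv, hl => by
      simp at hv hl
      simp only [List.set_cons_succ, List.zip_cons_cons]
      rw [zip_set_right v ta tb i x hv hl]

theorem zip_eraseIdx {α β : Type} :
    ∀ (a : List α) (b : List β), a.length = b.length → ∀ i,
      (a.eraseIdx i).zip (b.eraseIdx i) = (a.zip b).eraseIdx i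
  | [], _, _, _ => by simp
  | ha :: ta, [], hl, _ => by simp at hl
  | ha :: ta, hb :: tb, hl, 0 => by simp
  | ha :: ta, hb :: tb, hl, i + 1 => by
      simp at hl
      simp only [List.eraseIdx_cons_succ, List.zip_cons_cons]
      rw [zip_eraseIdx ta tb hl i]

theorem set_perm {α : Type} (l : List α) (i : Nat) (x : α) (h : i < l.length) :
    (l.set i x).Perm (l.eraseIdx i ++ [x]) := by
  rw [List.set_eq_take_cons_drop x h, List.eraseIdx_eq_take_drop_succ]
  exact List.perm_middle.trans (List.perm_append_singleton x _).symm

theorem map_fst_erase {pairs : List (String × Int)} (h : (pairs.map Prod.fst).Nodup)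
    {a : String} {b : Int} (hm : (a, b) ∈ pairs) :
    (pairs.erase (a, b)).map Prod.fst = (pairs.map Prod.fst).erase a := by
  induction pairs with
  | nil => simp at hm
  | cons p t ihp =>
    by_cases hp : p = (a, b)
    · subst hp; simp
    · have hmt : (a, b) ∈ t := by
        rcases List.mem_cons.mp hm with h1 | h1
        · exact absurd h1.symm hp
        · exact h1
      have hane : p.1 ≠ a := by
        intro he
        have : p.1 ∈ t.map Prod.fst := List.mem_map.mpr ⟨(a, b), hmt, by simp [he]⟩
        exact (List.nodup_cons.mp (by simpa using h)).1 this
      rw [List.erase_cons_tail (by simp [hp])]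
      simp only [List.map_cons]
      rw [List.erase_cons_tail (by simp [hane]), ihp (List.nodup_cons.mp (by simpa using h)).2 hmt]

theorem loop_eq (cacheSize : Int) (hcs : 1 ≤ cacheSize) :
    ∀ (cs : List String) (et order : Int) (nc : List String) (no : List Int)
      (pairs : List (String × Int)),
      nc.length = no.length →
      (nc.zip no).Perm pairs →
      (pairs.map Prod.snd).Pairwise (· < ·) →
      (∀ p ∈ pairs, p.2 < order) →
      nc.Nodup →
      solutionLoop cacheSize et nc no order cs = solutionAltLoop cacheSize et (pairs.map Prod.fst) cs := by
  intro cs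
  induction cs with
  | nil => intro et order nc no pairs _ _ _ _ _; rfl
  | cons c rest ih =>
    intro et order nc no pairs hlen hperm hsort hlt hnd
    have hzlen : (nc.zip no).length = nc.length := by simp [List.length_zip, hlen]
    have hkeys : nc.Perm (pairs.map Prod.fst) := by
      have h := hperm.map Prod.fst
      rwa [List.map_fst_zip (le_of_eq hlen)] at h
    have hsnds : no.Perm (pairs.map Prod.snd) := by
      have h := hperm.map Prod.snd
      rwa [List.map_snd_zip (le_of_eq hlen.symm)] at h
    have hkeysnd : (pairs.map Prod.fst).Nodup := hkeys.nodup hnd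
    have hpnd : pairs.Nodup := hkeysnd.of_map
    have hznd : (nc.zip no).Nodup := (hperm.nodup_iff).mpr hpnd
    have hplen : pairs.length = nc.length := by rw [← hperm.length_eq, hzlen]
    simp only [solutionLoop, solutionAltLoop]
    by_cases hin : PySem.Str.upper c ∈ nc
    · -- hit
      have hinB : PySem.Str.upper c ∈ pairs.map Prod.fst := hkeys.mem_iff.mp hin
      rw [if_pos hin, if_pos hinB]
      obtain ⟨idx, hidx⟩ := Option.isSome_iff_exists.mp ((PySem.List.index?_isSome_iff nc (PySem.Str.upper c)).mpr hin)
      rw [hidx, PySem.List.remove?_eq_some_erase _ _ hinB]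
      obtain ⟨hik, hget, -⟩ := PySem.List.getElem_of_index?_eq_some hidx
      have hikno : idx < no.length := hlen ▸ hik
      have hikz : idx < (nc.zip no).length := by rw [hzlen]; exact hik
      have hzget : (nc.zip no)[idx] = (PySem.Str.upper c, no[idx]) := by
        rw [List.getElem_zip, hget]
      have hmemp : (PySem.Str.upper c, no[idx]) ∈ pairs := by
        rw [← hzget]; exact hperm.mem_iff.mp (List.getElem_mem hikz)
      -- new pairs
      have hperm' : (nc.zip (no.set idx order)).Perm
          (pairs.erase (PySem.Str.upper c, no[idx]) ++ [(PySem.Str.upper c, order)]) := by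
        rw [zip_set_right (PySem.Str.upper c) nc no idx order (by simp [hget, List.getElem?_eq_getElem hik]) hlen]
        refine (set_perm _ idx _ hikz).trans ?_
        rw [← List.Nodup.erase_getElem hznd idx hikz, hzget]
        exact (hperm.erase _).append_right _
      have hsort' : (((pairs.erase (PySem.Str.upper c, no[idx])) ++ [(PySem.Str.upper c, order)]).map Prod.snd).Pairwise (· < ·) := by
        rw [List.map_append]
        refine List.pairwise_append.mpr ⟨hsort.sublist (List.erase_sublist.map _), by simp, ?_⟩
        intro a ha b hb
        simp at hb; subst hb
        obtain ⟨q, hq, rfl⟩ := List.mem_map.mp ha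
        exact hlt q (List.mem_of_mem_erase hq)
      have hlt' : ∀ p ∈ (pairs.erase (PySem.Str.upper c, no[idx])) ++ [(PySem.Str.upper c, order)], p.2 < order + 1 := by
        intro p hp
        rcases List.mem_append.mp hp with h1 | h1
        · exact lt_trans (hlt p (List.mem_of_mem_erase h1)) (by omega)
        · simp at h1; subst h1; omega
      have := ih (et + 1) (order + 1) nc (no.set idx order) _ (by simp [hlen]) hperm' hsort' hlt' hnd
      dsimp only
      rw [this, List.map_append, map_fst_erase hkeysnd hmemp]
      simp
    · -- miss
      have hinB : PySem.Str.upper c ∉ pairs.map Prod.fst := fun h => hin (hkeys.mem_iff.mpr h)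
      rw [if_neg hin, if_neg hinB]
      rw [List.length_map, hplen]
      by_cases hfull : (nc.length : Int) < cacheSize
      · -- room: append
        rw [if_pos hfull, if_pos hfull]
        have hperm' : ((nc ++ [PySem.Str.upper c]).zip (no ++ [order])).Perm (pairs ++ [(PySem.Str.upper c, order)]) := by
          rw [List.zip_append hlen]
          exact hperm.append_right _
        have hsort' : ((pairs ++ [(PySem.Str.upper c, order)]).map Prod.snd).Pairwise (· < ·) := by
          rw [List.map_append]
          refine List.pairwise_append.mpr ⟨hsort, by simp, ?_⟩
          intro a ha b hb
          simp at hb; subst hb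
          obtain ⟨q, hq, rfl⟩ := List.mem_map.mp ha
          exact hlt q hq
        have hlt' : ∀ p ∈ pairs ++ [(PySem.Str.upper c, order)], p.2 < order + 1 := by
          intro p hp
          rcases List.mem_append.mp hp with h1 | h1
          · exact lt_trans (hlt p h1) (by omega)
          · simp at h1; subst h1; omega
        have hnd' : (nc ++ [PySem.Str.upper c]).Nodup := by
          rw [List.nodup_append]
          refine ⟨hnd, List.nodup_singleton _, ?_⟩
          intro a ha b hb
          rw [List.mem_singleton] at hb
          subst hb
          exact fun he => hin (he ▸ ha)
        have := ih (et + 5) (order + 1) (nc ++ [PySem.Str.upper c]) (no ++ [order]) _ (by simp [hlen]) hperm' hsort' hlt' hnd'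
        rw [this, List.map_append]
        simp
      · -- evict
        rw [if_neg hfull, if_neg hfull]
        match pairs, hsort, hlt, hkeysnd, hpnd, hperm, hkeys, hsnds, hplen with
        | [], _, _, _, _, _, _, _, hplen0 =>
          exfalso
          have : nc.length = 0 := by simpa using hplen0.symm
          rw [this] at hfull
          simp at hfull
          omega
        | hd :: tl, hsort, hlt, hkeysnd, hpnd, hperm, hkeys, hsnds, hplen =>
        have hno_ne : no ≠ [] := by
          intro h
          rw [h] at hsnds
          have := hsnds.length_eq
          simp at this
        have hmne : PySem.List.min? no (fun y : Int => y) ≠ none :=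
          fun h => hno_ne ((PySem.List.min?_eq_none_iff no (fun y => y)).mp h)
        obtain ⟨m, hm⟩ := Option.isSome_iff_exists.mp (Option.isSome_iff_ne_none.mpr hmne)
        rw [hm]
        dsimp only
        have hmmem : m ∈ no := PySem.List.min?_mem hm
        have hmhd : m = hd.2 := by
          have h1 : m ≤ hd.2 := PySem.List.min?_isMin hm hd.2 (hsnds.mem_iff.mpr (by simp))
          have h2 : hd.2 ≤ m := by
            have hmm : m ∈ (hd :: tl).map Prod.snd := hsnds.mem_iff.mp hmmem
            rw [List.map_cons, List.mem_cons] at hmm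
            have hs2 := hsort
            rw [List.map_cons] at hs2
            rcases hmm with h | h
            · omega
            · exact le_of_lt ((List.pairwise_cons.mp hs2).1 m h)
          omega
        obtain ⟨idx, hidx⟩ := Option.isSome_iff_exists.mp ((PySem.List.index?_isSome_iff no m).mpr hmmem)
        rw [hidx]
        dsimp only
        obtain ⟨hik, hget, -⟩ := PySem.List.getElem_of_index?_eq_some hidx
        have hiknc : idx < nc.length := hlen ▸ hik
        have hikz : idx < (nc.zip no).length := by rw [hzlen]; exact hiknc
        have hzget : (nc.zip no)[idx] = (nc[idx], m) := by rw [List.getElem_zip, hget]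
        have hsndnd : ((hd :: tl).map Prod.snd).Nodup := hsort.imp ne_of_lt
        have hpair_hd : (nc[idx], m) = hd := by
          have hmem : (nc[idx], m) ∈ hd :: tl := by
            rw [← hzget]; exact hperm.mem_iff.mp (List.getElem_mem hikz)
          refine List.inj_on_of_nodup_map hsndnd hmem (by simp) ?_
          simp [hmhd]
        have hperm' : ((nc.eraseIdx idx ++ [PySem.Str.upper c]).zip (no.eraseIdx idx ++ [order])).Perm
            (tl ++ [(PySem.Str.upper c, order)]) := by
          rw [List.zip_append (by
            rw [List.length_eraseIdx_of_lt hiknc, List.length_eraseIdx_of_lt hik, hlen]),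
            zip_eraseIdx nc no hlen idx]
          refine List.Perm.append_right _ ?_
          rw [← List.Nodup.erase_getElem hznd idx hikz, hzget, hpair_hd]
          have := hperm.erase hd
          simpa using this
        have hsort' : ((tl ++ [(PySem.Str.upper c, order)]).map Prod.snd).Pairwise (· < ·) := by
          rw [List.map_append]
          refine List.pairwise_append.mpr ⟨(List.pairwise_cons.mp (by simpa using hsort)).2, by simp, ?_⟩
          intro a ha b hb
          simp at hb; subst hb
          obtain ⟨q, hq, rfl⟩ := List.mem_map.mp ha
          exact hlt q (by simp [hq])
        have hlt' : ∀ p ∈ tl ++ [(PySem.Str.upper c, order)], p.2 < order + 1 := by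
          intro p hp
          rcases List.mem_append.mp hp with h1 | h1
          · exact lt_trans (hlt p (by simp [h1])) (by omega)
          · simp at h1; subst h1; omega
        have hnd' : (nc.eraseIdx idx ++ [PySem.Str.upper c]).Nodup := by
          rw [List.nodup_append]
          refine ⟨hnd.sublist (List.eraseIdx_sublist nc idx), List.nodup_singleton _, ?_⟩
          intro a ha b hb
          rw [List.mem_singleton] at hb
          subst hb
          exact fun he => hin (he ▸ List.mem_of_mem_eraseIdx ha)
        have := ih (et + 5) (order + 1) (nc.eraseIdx idx ++ [PySem.Str.upper c]) (no.eraseIdx idx ++ [order]) _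
          (by simp [List.length_eraseIdx_of_lt hiknc, List.length_eraseIdx_of_lt hik, hlen]) hperm' hsort' hlt' hnd'
        rw [this, List.map_append]
        simp

-- ===== VERDICT (by name: the statement is the Claim_ definition above) =====
theorem solution_spec : Claim_equal_solution := by
  intro cacheSize cities _ hpre
  unfold Spec_solution
  by_cases h0 : cacheSize = 0
  · simp [solution, solution_alt, h0]
  · rcases hpre with hge | hnil
    · have hcs : 1 ≤ cacheSize := by omega
      rw [solution, solution_alt, if_neg h0, if_neg h0]
      exact loop_eq cacheSize hcs cities 0 0 [] [] [] rfl (List.Perm.refl _) (by simp) (by simp) (by simp)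
    · subst hnil
      rw [solution, solution_alt, if_neg h0, if_neg h0]
      rfl
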